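-- pv_equiv track=rewrite | github.com/deboradum/GymStatVisualizer | pythonFiles/statsClass.py | ddmmyy_to_formatted
-- ===== SOURCE A (Python) =====
-- def ddmmyy_to_formatted(date):
--     date_correct = ""
--     i = 0
--     for num in date:
--         if i == 2 or i == 4:
--             date_correct += '/'
--         date_correct += num
--         i += 1
--
--     return date_correct
-- ===== SOURCE B (Python) =====
-- def ddmmyy_to_formatted(date):
--     parts = [date[:2], date[2:4], date[4:]]
--     return '/'.join(p for p in parts if p)
-- ===== Notes on version B (the rewrite author's own statement) =====
-- stated objective: simpler
-- what changed: Replaces the character-by-character accumulation loop with its index counter by slicing the string into three fixed-width fields and joining the non-empty fields with the slash separator.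
import Mathlib
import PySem

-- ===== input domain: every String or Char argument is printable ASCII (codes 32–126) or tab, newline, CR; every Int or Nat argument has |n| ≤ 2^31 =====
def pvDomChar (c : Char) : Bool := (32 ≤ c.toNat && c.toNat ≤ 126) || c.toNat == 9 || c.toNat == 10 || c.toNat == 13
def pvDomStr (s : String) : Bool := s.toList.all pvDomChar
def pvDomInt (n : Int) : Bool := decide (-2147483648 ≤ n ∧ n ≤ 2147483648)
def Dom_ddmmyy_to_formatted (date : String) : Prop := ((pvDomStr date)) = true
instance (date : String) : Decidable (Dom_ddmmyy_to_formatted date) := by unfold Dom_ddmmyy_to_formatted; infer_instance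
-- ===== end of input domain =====

-- B replaces A's per-character loop (slash before indices 2 and 4) by slicing the
-- three fixed-width fields and joining the non-empty ones with '/': simpler decomposition.

-- ===== PORT A =====
-- the for-loop of A: state = (date_correct as List Char, i)
def pvALoop : List Char → List Char → Nat → List Char
  | [], acc, _ => acc
  | num :: rest, acc, i =>
      pvALoop rest ((if i == 2 || i == 4 then acc ++ ['/'] else acc) ++ [num]) (i + 1)

def ddmmyy_to_formatted (date : String) : String :=
  String.mk (pvALoop date.toList [] 0)

-- ===== PORT B =====
def ddmmyy_to_formatted_alt (date : String) : String :=
  let s := date.toList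
  let parts : List (List Char) :=
    [PySem.List.slice s none (some 2), PySem.List.slice s (some 2) (some 4),
     PySem.List.slice s (some 4) none]
  String.mk (PySem.Chars.join ['/'] (parts.filter (· ≠ [])))

-- ===== PRECONDITION & SPEC =====
def Spec_ddmmyy_to_formatted (date : String) (out : String) : Prop := out = ddmmyy_to_formatted_alt date
instance (date : String) (out : String) : Decidable (Spec_ddmmyy_to_formatted date out) := by unfold Spec_ddmmyy_to_formatted; infer_instance

-- ===== CLAIM (what is proved, stated in full; the proofs are below) =====
def Claim_equal_ddmmyy_to_formatted : Prop := ∀ (date : String), Dom_ddmmyy_to_formatted date → Spec_ddmmyy_to_formatted date (ddmmyy_to_formatted date)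

-- ===== LEMMAS AND PROOFS =====
-- After the first five characters (i ≥ 5), A's loop just appends the rest verbatim.
theorem pvALoop_ge5 (rest acc : List Char) (i : Nat) (h : 5 ≤ i) :
    pvALoop rest acc i = acc ++ rest := by
  induction rest generalizing acc i with
  | nil => simp [pvALoop]
  | cons c cs ih =>
      have h2 : i ≠ 2 := by omega
      have h4 : i ≠ 4 := by omega
      simp [pvALoop, h2, h4, ih (acc ++ [c]) (i + 1) (by omega)]

-- ===== VERDICT (by name: the statement is the Claim_ definition above) =====
theorem ddmmyy_to_formatted_spec : Claim_equal_ddmmyy_to_formatted := by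
  intro date _
  unfold Spec_ddmmyy_to_formatted ddmmyy_to_formatted ddmmyy_to_formatted_alt
  match h : date.toList with
  | [] => simp [pvALoop, PySem.List.slice, PySem.Chars.join, List.intercalate]
  | [a] => simp [pvALoop, PySem.List.slice, PySem.Chars.join, List.intercalate]
  | [a, b] => simp [pvALoop, PySem.List.slice, PySem.Chars.join, List.intercalate]
  | [a, b, c] => simp [pvALoop, PySem.List.slice, PySem.Chars.join, List.intercalate]
  | [a, b, c, d] => simp [pvALoop, PySem.List.slice, PySem.Chars.join, List.intercalate]
  | a :: b :: c :: d :: e :: rest =>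
      simp [pvALoop, pvALoop_ge5 rest _ 5 (by omega), PySem.List.slice,
        PySem.List.clampIdx, PySem.Chars.join, List.intercalate]
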